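-- pv_equiv track=rewrite | github.com/midri2420/Unit-Testing-and-Cryptography | Part 2 - Summative/2.2 Affine Cipher/main.py | convert_to_num
-- ===== SOURCE A (Python) =====
-- alpha = "ABCDEFGHIJKLMNOPQRSTUVWXYZ"
--
-- def convert_to_num(ngram):
--     """
--     ngram is text
--     converts a piece of text into a number by multiplying it by
--     26 ^ (index of letter), then sums it all.
--     """
--     num = 0
--     if len(ngram) == 0:
--         return num
--     ngram = ngram.upper()
--     for i in range(len(ngram)):
--         num += alpha.index(ngram[i]) * (26 ** i)
--     return num
-- ===== SOURCE B (Python) =====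
-- alpha = "ABCDEFGHIJKLMNOPQRSTUVWXYZ"
--
-- def convert_to_num(ngram):
--     """Horner's method: fold over the characters from last to first,
--     num = num * 26 + alpha.index(ch); no explicit 26**i powers."""
--     num = 0
--     for ch in reversed(ngram.upper()):
--         num = num * 26 + alpha.index(ch)
--     return num
-- ===== Notes on version B (the rewrite author's own statement) =====
-- stated objective: faster
-- what changed: Replaces the index loop with per-position 26**i exponentiation by Horner's method: a single multiply-accumulate fold over the characters in reverse order, with no powers computed.
import Mathlib
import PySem

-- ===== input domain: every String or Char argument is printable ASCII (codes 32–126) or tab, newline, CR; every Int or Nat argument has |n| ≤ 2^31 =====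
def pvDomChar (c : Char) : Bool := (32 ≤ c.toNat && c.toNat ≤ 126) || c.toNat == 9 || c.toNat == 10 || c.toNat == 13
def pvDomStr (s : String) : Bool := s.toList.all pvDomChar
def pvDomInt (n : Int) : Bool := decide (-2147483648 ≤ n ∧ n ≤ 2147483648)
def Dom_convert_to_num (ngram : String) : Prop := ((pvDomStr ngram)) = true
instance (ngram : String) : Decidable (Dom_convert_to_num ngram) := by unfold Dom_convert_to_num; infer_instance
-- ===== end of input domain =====

-- B replaces A's 26**i exponentiation loop by Horner's method over the reversed string (alternative decomposition, same results).

-- alpha = "ABCDEFGHIJKLMNOPQRSTUVWXYZ"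
def pvAlpha : List Char := "ABCDEFGHIJKLMNOPQRSTUVWXYZ".toList

-- alpha.index(c): ValueError (none) is excluded by Pre_; .getD 0 is never reached inside Pre_
def pvIdx (c : Char) : Int := ((PySem.List.index? pvAlpha c).getD 0 : Nat)

-- ===== PORT A =====
def convert_to_num (ngram : String) : Int :=
  let num : Int := 0
  if ngram.length = 0 then num
  else
    let up := PySem.Chars.upper ngram.toList
    (PySem.List.pyRange 0 (up.length : Int) 1).foldl
      (fun num i => num + pvIdx (PySem.List.pyGetD up i 'A') * 26 ^ i.toNat) num

-- ===== PORT B =====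
def convert_to_num_alt (ngram : String) : Int :=
  (PySem.Chars.upper ngram.toList).reverse.foldl (fun num c => num * 26 + pvIdx c) 0

-- ===== PRECONDITION & SPEC =====
-- Pre_ excludes exactly the strings containing a non-letter character, on which alpha.index raises ValueError in A (and in B).
def Pre_convert_to_num (ngram : String) : Prop :=
  (ngram.toList.all (fun c => PySem.Chars.upperChar c ∈ pvAlpha)) = true
instance (ngram : String) : Decidable (Pre_convert_to_num ngram) := by
  unfold Pre_convert_to_num; infer_instance

def pvWitness_convert_to_num : String := "Hi"

def Spec_convert_to_num (ngram : String) (out : Int) : Prop := out = convert_to_num_alt ngram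
instance (ngram : String) (out : Int) : Decidable (Spec_convert_to_num ngram out) := by unfold Spec_convert_to_num; infer_instance

-- ===== CLAIM (what is proved, stated in full; the proofs are below) =====
def Claim_equal_convert_to_num : Prop := ∀ (ngram : String), Dom_convert_to_num ngram → Pre_convert_to_num ngram → Spec_convert_to_num ngram (convert_to_num ngram)

-- ===== LEMMAS AND PROOFS =====

-- the common base-26 value, little-endian (head is the 26^0 digit)
def pvHval : List Int → Int
  | [] => 0
  | a :: t => a + 26 * pvHval t

theorem pvHval_append_singleton (l : List Int) (a : Int) :
    pvHval (l ++ [a]) = pvHval l + a * 26 ^ l.length := by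
  induction l with
  | nil => simp [pvHval]
  | cons x t ih => simp [pvHval, ih]; ring

-- B's Horner fold computes pvHval
theorem pvAlt_eq_hval (l : List Char) :
    l.reverse.foldl (fun num c => num * 26 + pvIdx c) 0 = pvHval (l.map pvIdx) := by
  induction l with
  | nil => simp [pvHval]
  | cons c t ih => simp [List.foldl_append, pvHval, ih]; ring

-- A's indexed power loop computes pvHval
theorem pvA_eq_hval (l : List Char) :
    (PySem.List.pyRange 0 (l.length : Int) 1).foldl
      (fun num i => num + pvIdx (PySem.List.pyGetD l i 'A') * 26 ^ i.toNat) 0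
      = pvHval (l.map pvIdx) := by
  induction l using List.reverseRecOn with
  | nil => simp [PySem.List.pyRange, pvHval]
  | append_singleton t c ih =>
    have hlen : ((t ++ [c]).length : Int) = (t.length : Int) + 1 := by simp
    rw [hlen, PySem.List.pyRange_one_succ_right (by positivity), List.foldl_append]
    have hcong :
        (PySem.List.pyRange 0 (t.length : Int) 1).foldl
          (fun num i => num + pvIdx (PySem.List.pyGetD (t ++ [c]) i 'A') * 26 ^ i.toNat) 0
        = (PySem.List.pyRange 0 (t.length : Int) 1).foldl
          (fun num i => num + pvIdx (PySem.List.pyGetD t i 'A') * 26 ^ i.toNat) 0 := by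
      apply PySem.List.foldl_congr_mem
      intro acc i hi
      have hmem := (PySem.List.mem_pyRange_one.mp hi)
      have h0 : 0 ≤ i := hmem.1
      have hlt : i < (t.length : Int) := hmem.2
      have hget : PySem.List.pyGetD (t ++ [c]) i 'A' = PySem.List.pyGetD t i 'A' := by
        rw [PySem.List.pyGetD_of_nonneg _ _ h0, PySem.List.pyGetD_of_nonneg _ _ h0]
        have : i.toNat < t.length := by omega
        simp [List.getD, List.getElem?_append_left this]
      rw [hget]
    rw [hcong, ih]
    simp only [List.foldl_cons, List.foldl_nil, List.map_append, List.map_cons, List.map_nil,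
      pvHval_append_singleton, List.length_map]
    rw [PySem.List.pyGetD_of_nonneg _ _ (by positivity : (0:Int) ≤ (t.length : Int))]
    simp [List.getD]

-- ===== VERDICT (by name: the statement is the Claim_ definition above) =====
theorem convert_to_num_spec : Claim_equal_convert_to_num := by
  intro ngram _ _
  unfold Spec_convert_to_num convert_to_num convert_to_num_alt
  by_cases h : ngram.length = 0
  · have hnil : ngram.toList = [] := List.eq_nil_of_length_eq_zero (by simpa using h)
    rw [if_pos h, hnil]
    rfl
  · simp only [h, if_false]
    rw [pvAlt_eq_hval, ← pvA_eq_hval]
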